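-- pv_equiv track=rewrite | github.com/njavet/rai | sudoku/csp_sudoku.py | get_box_indexes
-- ===== SOURCE A (Python) =====
-- def get_box_indexes(i, j):
--     rs = i - i % 3
--     cs = j - j % 3
--     box = []
--     for ii in range(rs, rs + 3):
--         for jj in range(cs, cs + 3):
--             if ii != i and jj != j:
--                 box.append((ii, jj))
--     assert(len(box) == 4)
--     return box
-- ===== SOURCE B (Python) =====
-- _OFFS = ((1, 2), (-1, 1), (-2, -1))
--
-- def get_box_indexes(i, j):
--     # Closed form: the two box rows other than i are i + dr, dr from the
--     # offset table indexed by i % 3; same for columns. No loops, no filter.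
--     dr = _OFFS[i % 3]
--     dc = _OFFS[j % 3]
--     r1, r2 = i + dr[0], i + dr[1]
--     c1, c2 = j + dc[0], j + dc[1]
--     return [(r1, c1), (r1, c2), (r2, c1), (r2, c2)]
-- ===== Notes on version B (the rewrite author's own statement) =====
-- stated objective: alternative
-- what changed: Replaces A's nested 3x3 sweep with a filter and an assert by a loop-free closed form: an offset table indexed by i%3 (resp. j%3) gives the two complementary rows (columns) directly, and the four cells are written out as literals.
import Mathlib
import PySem

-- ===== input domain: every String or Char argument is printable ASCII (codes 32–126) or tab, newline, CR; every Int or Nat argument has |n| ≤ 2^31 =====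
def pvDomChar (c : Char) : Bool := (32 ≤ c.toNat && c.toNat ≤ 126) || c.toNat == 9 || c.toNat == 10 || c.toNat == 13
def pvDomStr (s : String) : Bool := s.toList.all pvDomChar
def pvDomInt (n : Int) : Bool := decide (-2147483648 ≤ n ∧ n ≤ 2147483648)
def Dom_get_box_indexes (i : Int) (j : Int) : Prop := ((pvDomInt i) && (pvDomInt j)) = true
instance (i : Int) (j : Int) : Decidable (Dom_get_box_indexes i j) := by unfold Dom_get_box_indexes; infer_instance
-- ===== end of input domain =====

-- B replaces A's 3x3 filtered sweep (with assert) by a loop-free closed form: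
-- an offset table indexed by i%3 / j%3 yields the two complementary rows and
-- columns, and the four cells are written out directly (alternative; exact,
-- the assert always holds since i, j lie inside their box).


-- ===== PORT A =====
-- The assert(len(box) == 4) always succeeds: i ∈ [rs, rs+3) and j ∈ [cs, cs+3),
-- so exactly 2·2 pairs pass the filter; hence the port omits it and is exact.
def get_box_indexes (i : Int) (j : Int) : List (Int × Int) :=
  let rs := i - PySem.Int.mod i 3
  let cs := j - PySem.Int.mod j 3
  (PySem.List.pyRange rs (rs + 3) 1).foldl (fun box ii =>
    (PySem.List.pyRange cs (cs + 3) 1).foldl (fun box jj =>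
      if ii ≠ i ∧ jj ≠ j then box ++ [(ii, jj)] else box) box) []

-- ===== PORT B =====
-- _OFFS from Source B; the table index i % 3 is always in {0,1,2}, so the
-- pyGet? lookup never fails and the .getD default (0, 0) is unreachable.
def pvOffs : List (Int × Int) := [(1, 2), (-1, 1), (-2, -1)]

def get_box_indexes_alt (i : Int) (j : Int) : List (Int × Int) :=
  let dr := (PySem.List.pyGet? pvOffs (PySem.Int.mod i 3)).getD (0, 0)
  let dc := (PySem.List.pyGet? pvOffs (PySem.Int.mod j 3)).getD (0, 0)
  let r1 := i + dr.1; let r2 := i + dr.2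
  let c1 := j + dc.1; let c2 := j + dc.2
  [(r1, c1), (r1, c2), (r2, c1), (r2, c2)]

-- ===== PRECONDITION & SPEC =====
def Spec_get_box_indexes (i : Int) (j : Int) (out : List (Int × Int)) : Prop := out = get_box_indexes_alt i j
instance (i : Int) (j : Int) (out : List (Int × Int)) : Decidable (Spec_get_box_indexes i j out) := by unfold Spec_get_box_indexes; infer_instance

-- ===== CLAIM =====
def Claim_equal_get_box_indexes : Prop := ∀ (i : Int) (j : Int), Dom_get_box_indexes i j → Spec_get_box_indexes i j (get_box_indexes i j)

-- ===== LEMMAS AND PROOFS =====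

-- Inner column loop of A: appends (ii, c) for the filtered columns, unless ii = i.
theorem pv_inner (i j ii : Int) (C : List Int) (acc : List (Int × Int)) :
    C.foldl (fun box jj => if ii ≠ i ∧ jj ≠ j then box ++ [(ii, jj)] else box) acc
      = acc ++ (if ii = i then [] else (C.filter (fun c => c ≠ j)).map (fun c => (ii, c))) := by
  induction C generalizing acc with
  | nil => simp
  | cons c cs ih =>
    rw [List.foldl_cons, ih]
    by_cases hii : ii = i <;> by_cases hc : c = j <;> simp [hii, hc]

-- Outer row loop of A as a flatMap over the filtered rows.
theorem pv_outer (i j : Int) (R C : List Int) (acc : List (Int × Int)) :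
    R.foldl (fun box ii =>
        C.foldl (fun box jj => if ii ≠ i ∧ jj ≠ j then box ++ [(ii, jj)] else box) box) acc
      = acc ++ (R.filter (fun r => r ≠ i)).flatMap
          (fun r => (C.filter (fun c => c ≠ j)).map (fun c => (r, c))) := by
  induction R generalizing acc with
  | nil => simp
  | cons r rs ih =>
    rw [List.foldl_cons, ih, pv_inner]
    by_cases hr : r = i <;> simp [hr]

theorem pv_range3 (a : Int) : PySem.List.pyRange a (a + 3) 1 = [a, a + 1, a + 2] := by
  rw [PySem.List.pyRange_one_cons (by omega), PySem.List.pyRange_one_cons (by omega),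
      PySem.List.pyRange_one_cons (by omega), PySem.List.pyRange_one_eq_nil (by omega)]
  norm_num
  omega

-- ===== VERDICT =====
theorem get_box_indexes_spec : Claim_equal_get_box_indexes := by
  intro i j _
  unfold Spec_get_box_indexes get_box_indexes get_box_indexes_alt
  have hmod : ∀ a : Int, PySem.Int.mod a 3 = a % 3 := fun a =>
    PySem.Int.mod_eq_emod_of_pos (by norm_num)
  have hi := Int.emod_nonneg i (by norm_num : (3:Int) ≠ 0)
  have hi' := Int.emod_lt_of_pos i (by norm_num : (0:Int) < 3)
  have hj := Int.emod_nonneg j (by norm_num : (3:Int) ≠ 0)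
  have hj' := Int.emod_lt_of_pos j (by norm_num : (0:Int) < 3)
  simp only [hmod]
  rw [pv_range3, pv_range3, pv_outer]
  have a0 : i - (0:Int) = i := by ring
  have a1 : i - 0 + 1 = i + 1 := by ring
  have a2 : i - 0 + 2 = i + 2 := by ring
  have a3 : i - 1 + 1 = i := by ring
  have a4 : i - 2 + 2 = i := by ring
  have a5 : i - 2 + 1 = i - 1 := by ring
  have n1 : i + 1 ≠ i := by omega
  have n2 : i + 2 ≠ i := by omega
  have n3 : i - 1 ≠ i := by omega
  have n4 : i - 2 ≠ i := by omega
  have b0 : j - (0:Int) = j := by ring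
  have b1 : j - 0 + 1 = j + 1 := by ring
  have b2 : j - 0 + 2 = j + 2 := by ring
  have b3 : j - 1 + 1 = j := by ring
  have b4 : j - 2 + 2 = j := by ring
  have b5 : j - 2 + 1 = j - 1 := by ring
  have m1 : j + 1 ≠ j := by omega
  have m2 : j + 2 ≠ j := by omega
  have m3 : j - 1 ≠ j := by omega
  have m4 : j - 2 ≠ j := by omega
  have hmi : i % 3 = 0 ∨ i % 3 = 1 ∨ i % 3 = 2 := by omega
  have hmj : j % 3 = 0 ∨ j % 3 = 1 ∨ j % 3 = 2 := by omega
  rcases hmi with hm | hm | hm <;> rcases hmj with hn | hn | hn <;> rw [hm, hn] <;>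
    simp [pvOffs, PySem.List.pyGet?, PySem.List.pyIdx?, List.filter,
          a0, a3, a4, a5, n1, n2, n3, n4,
          b0, b3, b4, b5, m1, m2, m3, m4] <;>
    simp [show i + -1 + 2 = i + 1 from by ring, show j + -1 + 2 = j + 1 from by ring,
          n1, m1, sub_eq_add_neg]
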